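-- pv_equiv track=rewrite | github.com/MoonSkylight/easypips-web | api_pro.py | latest_swing_range
-- ===== SOURCE A (Python) =====
-- def latest_swing_range(swings):
--     latest_low = None
--     latest_high = None
--
--     for swing in reversed(swings):
--         if swing["type"] == "low" and latest_low is None:
--             latest_low = swing
--         elif swing["type"] == "high" and latest_high is None:
--             latest_high = swing
--
--         if latest_low and latest_high:
--             return latest_low, latest_high
--
--     return None, None
-- ===== SOURCE B (Python) =====
-- def latest_swing_range(swings):
--     latest_low = next((s for s in reversed(swings) if s["type"] == "low"), None)
--     latest_high = next((s for s in reversed(swings) if s["type"] == "high"), None)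
--     if latest_low and latest_high:
--         return latest_low, latest_high
--     return None, None
-- ===== Notes on version B (the rewrite author's own statement) =====
-- stated objective: idiomatic
-- what changed: Replaces the single reverse scan maintaining two accumulators with early exit by two independent first-match searches over reversed(swings), combined only at the end.
import Mathlib
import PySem

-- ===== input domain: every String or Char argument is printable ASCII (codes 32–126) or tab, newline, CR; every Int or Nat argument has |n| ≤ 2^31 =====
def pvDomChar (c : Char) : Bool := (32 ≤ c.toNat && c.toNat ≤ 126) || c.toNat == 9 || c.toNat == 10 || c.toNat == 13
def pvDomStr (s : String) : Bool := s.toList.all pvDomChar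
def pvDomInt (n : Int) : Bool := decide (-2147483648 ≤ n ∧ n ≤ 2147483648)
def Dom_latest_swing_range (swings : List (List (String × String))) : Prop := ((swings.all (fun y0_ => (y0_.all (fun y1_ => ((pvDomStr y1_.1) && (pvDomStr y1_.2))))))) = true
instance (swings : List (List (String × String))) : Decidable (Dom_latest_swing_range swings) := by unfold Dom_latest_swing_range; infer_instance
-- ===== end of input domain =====

-- B replaces A's single reverse scan with two accumulators and early exit by two
-- independent first-match searches over the reversed list (idiomatic decomposition).

-- ===== PORT A =====
-- swing["type"]: first-match lookup; the default "" stands where Python raises KeyError (outside Pre_)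
def pvTypeOf (s : List (String × String)) : String :=
  ((s.find? (fun p => p.1 == "type")).map (·.2)).getD ""

-- Python truthiness of `latest_low and latest_high`: None is falsy, a dict is truthy iff nonempty
def pvTruthy (o : Option (List (String × String))) : Bool :=
  match o with
  | none => false
  | some d => !d.isEmpty

def latest_swing_range_go : List (List (String × String)) →
    Option (List (String × String)) → Option (List (String × String)) →
    (Option (List (String × String))) × (Option (List (String × String)))
  | [], _, _ => (none, none)
  | swing :: rest, ll, lh =>
    let st :=
      if pvTypeOf swing == "low" && ll.isNone then (some swing, lh)
      else if pvTypeOf swing == "high" && lh.isNone then (ll, some swing)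
      else (ll, lh)
    if pvTruthy st.1 && pvTruthy st.2 then (st.1, st.2)
    else latest_swing_range_go rest st.1 st.2

def latest_swing_range (swings : List (List (String × String))) : (Option (List (String × String))) × (Option (List (String × String))) :=
  latest_swing_range_go swings.reverse none none

-- ===== PORT B =====
def latest_swing_range_alt (swings : List (List (String × String))) : (Option (List (String × String))) × (Option (List (String × String))) :=
  let latest_low := swings.reverse.find? (fun s => pvTypeOf s == "low")
  let latest_high := swings.reverse.find? (fun s => pvTypeOf s == "high")
  if pvTruthy latest_low && pvTruthy latest_high then (latest_low, latest_high)
  else (none, none)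

-- ===== PRECONDITION & SPEC =====
-- Pre_ excludes exactly the inputs on which Python raises KeyError: a swing without a "type"
-- key that the reverse scan reaches, i.e. whose reversed prefix still lacks a low or a high
-- (both A and B raise on exactly these inputs). The ports themselves are total (the ""
-- default never matches "low"/"high"), so the equality proof below holds without using Pre_.
def Pre_latest_swing_range (swings : List (List (String × String))) : Prop :=
  ∀ i < swings.reverse.length,
    (((swings.reverse.take i).all (fun s => !(pvTypeOf s == "low"))) = true ∨
     ((swings.reverse.take i).all (fun s => !(pvTypeOf s == "high"))) = true) →
    (((swings.reverse.getD i []).find? (fun p => p.1 == "type")).isSome) = true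

instance (swings : List (List (String × String))) : Decidable (Pre_latest_swing_range swings) := by unfold Pre_latest_swing_range; infer_instance

def pvWitness_latest_swing_range : (List (List (String × String))) :=
  [[("type", "low"), ("price", "1")], [("type", "high")]]

def Spec_latest_swing_range (swings : List (List (String × String))) (out : (Option (List (String × String))) × (Option (List (String × String)))) : Prop := out = latest_swing_range_alt swings
instance (swings : List (List (String × String))) (out : (Option (List (String × String))) × (Option (List (String × String)))) : Decidable (Spec_latest_swing_range swings out) := by unfold Spec_latest_swing_range; infer_instance

-- ===== CLAIM (what is proved, stated in full; the proofs are below) =====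
def Claim_equal_latest_swing_range : Prop := ∀ (swings : List (List (String × String))), Dom_latest_swing_range swings → Pre_latest_swing_range swings → Spec_latest_swing_range swings (latest_swing_range swings)

-- ===== LEMMAS AND PROOFS =====

-- an element with a "type" key is a nonempty list, hence truthy when wrapped in some
theorem pvTruthy_of_hasType {s : List (String × String)}
    (h : (s.find? (fun p => p.1 == "type")).isSome) : pvTruthy (some s) = true := by
  cases s with
  | nil => simp [List.find?] at h
  | cons a t => simp [pvTruthy, List.isEmpty]

-- invariant characterisation of A's loop: with states that are none or truthy elements
-- of the precondition's kind, and not yet both set, the loop computes B's two searches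
theorem go_spec (r : List (List (String × String)))
    (ll lh : Option (List (String × String)))
    (hll : ∀ d, ll = some d → pvTruthy (some d) = true)
    (hlh : ∀ d, lh = some d → pvTruthy (some d) = true)
    (hnb : ¬ (pvTruthy ll = true ∧ pvTruthy lh = true)) :
    latest_swing_range_go r ll lh =
      (let L := ll.or (r.find? (fun s => pvTypeOf s == "low"));
       let H := lh.or (r.find? (fun s => pvTypeOf s == "high"));
       if pvTruthy L && pvTruthy H then (L, H) else (none, none)) := by
  induction r generalizing ll lh with
  | nil =>
    simp only [latest_swing_range_go, List.find?, Option.or_none]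
    rw [if_neg]
    intro h
    rw [Bool.and_eq_true] at h
    exact hnb h
  | cons swing rest ih =>
    simp only [latest_swing_range_go]
    by_cases hlow : (pvTypeOf swing == "low" && ll.isNone) = true
    · -- swing becomes the new latest_low
      have hlln : ll = none := by
        cases ll with
        | none => rfl
        | some d => simp at hlow
      have hlowP : (pvTypeOf swing == "low") = true := by
        rw [Bool.and_eq_true] at hlow; exact hlow.1
      have htr : pvTruthy (some swing) = true := by
        apply pvTruthy_of_hasType
        cases h : swing.find? (fun p => p.1 == "type") with
        | some v => rfl
        | none => simp [pvTypeOf, h] at hlowP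
      subst hlln
      simp only [hlow, if_true]
      by_cases hhigh : pvTruthy lh = true
      · -- both now truthy: early return; find? low on swing::rest hits swing
        simp only [htr, hhigh, Bool.and_self, if_true]
        have : (swing :: rest).find? (fun s => pvTypeOf s == "low") = some swing := by
          simp [List.find?, hlowP]
        simp only [this, Option.none_or]
        cases lh with
        | none => exact Bool.noConfusion hhigh
        | some d =>
          simp only [Option.some_or]
          rw [if_pos]
          simp [htr, hhigh]
      · simp only [htr, Bool.true_and]
        rw [if_neg hhigh]
        rw [ih (some swing) lh (fun d hd => by cases hd; exact htr) hlh
              (by intro h; exact hhigh h.2)]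
        have : (swing :: rest).find? (fun s => pvTypeOf s == "low") = some swing := by
          simp [List.find?, hlowP]
        have hnhigh : (pvTypeOf swing == "high") = false := by
          have := eq_of_beq hlowP
          simp [this]
        have h2 : (swing :: rest).find? (fun s => pvTypeOf s == "high")
            = rest.find? (fun s => pvTypeOf s == "high") := by
          simp [List.find?, hnhigh]
        simp [this, h2]
    · by_cases hhigh : (pvTypeOf swing == "high" && lh.isNone) = true
      · -- swing becomes the new latest_high
        have hlhn : lh = none := by
          cases lh with
          | none => rfl
          | some d => simp at hhigh
        have hhighP : (pvTypeOf swing == "high") = true := by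
          rw [Bool.and_eq_true] at hhigh; exact hhigh.1
        have htr : pvTruthy (some swing) = true := by
          apply pvTruthy_of_hasType
          cases h : swing.find? (fun p => p.1 == "type") with
          | some v => rfl
          | none => simp [pvTypeOf, h] at hhighP
        subst hlhn
        rw [Bool.not_eq_true] at hlow
        simp only [hlow, Bool.false_eq_true, if_false, hhigh, if_true]
        have hfh : (swing :: rest).find? (fun s => pvTypeOf s == "high") = some swing := by
          simp [List.find?, hhighP]
        have hnlow : (pvTypeOf swing == "low") = false := by
          have := eq_of_beq hhighP
          simp [this]
        have hfl : (swing :: rest).find? (fun s => pvTypeOf s == "low")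
            = rest.find? (fun s => pvTypeOf s == "low") := by
          simp [List.find?, hnlow]
        by_cases hlt : pvTruthy ll = true
        · simp only [hlt, htr, Bool.and_self, if_true]
          cases ll with
          | none => exact Bool.noConfusion hlt
          | some d =>
            simp only [hfh, hfl, Option.some_or]
            rw [if_pos]
            · by_cases hfind : rest.find? (fun s => pvTypeOf s == "low") = none
              · simp
              · cases h : rest.find? (fun s => pvTypeOf s == "low") with
                | none => exact absurd h hfind
                | some e => simp
            · simp [hlt, htr]
        · simp only [htr, Bool.and_true]
          rw [if_neg hlt]
          rw [ih ll (some swing) hll (fun d hd => by cases hd; exact htr)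
                (by intro h; exact hlt h.1)]
          simp [hfh, hfl]
      · -- neither branch fires: state unchanged
        rw [Bool.not_eq_true] at hlow hhigh
        simp only [hlow, hhigh, Bool.false_eq_true, if_false]
        rw [if_neg (by intro h; rw [Bool.and_eq_true] at h; exact hnb h)]
        rw [ih ll lh hll hlh hnb]
        -- if the state already holds a low/high, find? result is irrelevant (Option.or)
        cases ll with
        | some d =>
          cases lh with
          | some e =>
            exact absurd ⟨hll d rfl, hlh e rfl⟩ hnb
          | none =>
            have : (pvTypeOf swing == "high") = false := by simpa using hhigh
            simp [List.find?, this]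
        | none =>
          have hl : (pvTypeOf swing == "low") = false := by simpa using hlow
          cases lh with
          | some e =>
            simp [List.find?, hl]
          | none =>
            have hh : (pvTypeOf swing == "high") = false := by simpa using hhigh
            simp [List.find?, hl, hh]

-- ===== VERDICT (by name: the statement is the Claim_ definition above) =====
theorem latest_swing_range_spec : Claim_equal_latest_swing_range := by
  intro swings _ _
  unfold Spec_latest_swing_range latest_swing_range latest_swing_range_alt
  rw [go_spec swings.reverse none none (by intro d h; cases h) (by intro d h; cases h)
        (by intro h; simp [pvTruthy] at h)]
  simp
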